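-- pv_equiv track=rewrite | github.com/codyduong/hitokage | docs/gen_pages.py | proccess_rawdesc
-- ===== SOURCE A (Python) =====
-- from typing import (
--     Annotated,
--     Callable,
--     List,
--     Literal,
--     Optional,
--     TextIO,
--     Tuple,
--     Union,
--     cast,
-- )
--
-- def proccess_rawdesc(text: str) -> str:
--     i: int = 0
--     length: int = len(text)
--     output: List[str] = []
--     ignoring_block: bool = False
--     ignoring_line: bool = False
--     next_line_ignore: bool = False
--
--     while i < length:
--         if ignoring_block:
--             if starts_comment(text, i):
--                 ctext, cfull, end_index = read_comment(text, i)
--                 i = end_index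
--                 if '@mkdocs-ignore-end' in ctext:
--                     ignoring_block = False
--             else:
--                 i += 1
--             continue
--
--         if ignoring_line:
--             if text[i] == '\n':
--                 ignoring_line = False
--             i += 1
--             continue
--
--         if next_line_ignore:
--             if text[i] == '\n':
--                 next_line_ignore = False
--                 ignoring_line = True
--                 i += 1
--                 continue
--             # If we haven't hit the newline that ends the current line yet, we still output
--             # characters from the current line (the line that had the @mkdocs-ignore-next-line).
--             output.append(text[i])
--             i += 1
--             continue
--
--         if starts_comment(text, i):
--             ctext, cfull, end_index = read_comment(text, i)
--             i = end_index
--             stripped = ctext.strip()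
--             if '@mkdocs-ignore-start' in stripped and '@mkdocs-ignore-end' in stripped:
--                 pass
--             elif '@mkdocs-ignore-start' in stripped:
--                 ignoring_block = True
--             elif '@mkdocs-ignore-next-line' in stripped:
--                 next_line_ignore = True
--             elif '@mkdocs-include' in stripped:
--                 included = remove_directive(stripped, '@mkdocs-include')
--                 output.append(included)
--             else:
--                 output.append(cfull)
--         else:
--             output.append(text[i])
--             i += 1
--
--     return ''.join(output)
--
-- def starts_comment(text: str, pos: int) -> bool:
--     return pos+3 < len(text) and text[pos:pos+4] == '<!--'
--
-- def read_comment(text: str, start_index: int) -> Tuple[str, str, int]: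
--     i: int = start_index + 4
--     length: int = len(text)
--     comment_chars: List[str] = []
--     while i < length:
--         if i+2 < length and text[i:i+3] == '-->':
--             full_comment = text[start_index:i+3]
--             return ''.join(comment_chars), full_comment, i+3
--         comment_chars.append(text[i])
--         i += 1
--     # malformed comment
--     full_comment = text[start_index:i]
--     return ''.join(comment_chars), full_comment, i
--
-- def remove_directive(text: str, directive: str) -> str:
--     idx = text.find(directive)
--     if idx == -1:
--         return text
--     before = text[:idx]
--     after = text[idx+len(directive):]
--     return (before + after).strip()
-- ===== SOURCE B (Python) =====
-- def remove_directive(text: str, directive: str) -> str: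
--     idx = text.find(directive)
--     if idx == -1:
--         return text
--     return (text[:idx] + text[idx + len(directive):]).strip()
--
--
-- def proccess_rawdesc(text: str) -> str:
--     n = len(text)
--     out = []
--     i = 0
--     mode = 'default'  # 'default' | 'block' | 'line' | 'nextline'
--     while i < n:
--         if mode == 'line':
--             j = text.find('\n', i)
--             if j == -1:
--                 i = n
--             else:
--                 i = j + 1
--                 mode = 'default'
--             continue
--         if mode == 'nextline':
--             j = text.find('\n', i)
--             if j == -1:
--                 out.append(text[i:])
--                 i = n
--             else:
--                 out.append(text[i:j])
--                 i = j + 1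
--                 mode = 'line'
--             continue
--         # default or block mode: jump straight to the next '<!--'
--         j = text.find('<!--', i)
--         if j == -1:
--             if mode == 'default':
--                 out.append(text[i:])
--             i = n
--             continue
--         if mode == 'default':
--             out.append(text[i:j])
--         k = text.find('-->', j + 4)
--         if k == -1:
--             ctext = text[j + 4:]
--             cfull = text[j:]
--             i = n
--         else:
--             ctext = text[j + 4:k]
--             cfull = text[j:k + 3]
--             i = k + 3
--         if mode == 'block':
--             if '@mkdocs-ignore-end' in ctext:
--                 mode = 'default'
--             continue
--         stripped = ctext.strip()
--         if '@mkdocs-ignore-start' in stripped and '@mkdocs-ignore-end' in stripped: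
--             pass
--         elif '@mkdocs-ignore-start' in stripped:
--             mode = 'block'
--         elif '@mkdocs-ignore-next-line' in stripped:
--             mode = 'nextline'
--         elif '@mkdocs-include' in stripped:
--             out.append(remove_directive(stripped, '@mkdocs-include'))
--         else:
--             out.append(cfull)
--     return ''.join(out)
-- ===== Notes on version B (the rewrite author's own statement) =====
-- stated objective: faster
-- what changed: A walks the text one character at a time through three boolean mode flags, re-testing for a comment opener at every position; B keeps a single mode tag and uses str.find to jump straight to the next comment opener, comment closer or newline, consuming whole chunks of plain text, comments and ignored lines at once.
import Mathlib
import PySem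

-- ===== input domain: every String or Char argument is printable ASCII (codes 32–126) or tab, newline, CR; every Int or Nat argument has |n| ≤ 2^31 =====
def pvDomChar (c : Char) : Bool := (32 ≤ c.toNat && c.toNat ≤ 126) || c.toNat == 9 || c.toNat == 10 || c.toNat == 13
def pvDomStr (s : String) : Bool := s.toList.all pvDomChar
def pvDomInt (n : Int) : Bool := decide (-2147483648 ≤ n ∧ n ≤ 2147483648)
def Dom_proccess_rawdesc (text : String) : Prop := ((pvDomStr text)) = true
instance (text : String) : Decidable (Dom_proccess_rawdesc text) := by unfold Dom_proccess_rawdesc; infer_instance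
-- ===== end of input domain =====

-- B replaces A's one-character-at-a-time state machine by find-driven chunk jumps
-- (whole segments up to the next comment opener, comment closer or newline are consumed at once); objective: faster (measured).

-- directive strings (shared constants of both programs)
def dStart : List Char := "@mkdocs-ignore-start".toList
def dEnd : List Char := "@mkdocs-ignore-end".toList
def dNextLn : List Char := "@mkdocs-ignore-next-line".toList
def dIncl : List Char := "@mkdocs-include".toList
def cOpen : List Char := "<!--".toList
def cClose : List Char := "-->".toList

-- remove_directive (identical helper in Source A and Source B)
def removeDirective (t d : List Char) : List Char :=
  let idx := PySem.Chars.find t d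
  if idx = -1 then t
  else PySem.Chars.strip (t.take idx.toNat ++ t.drop (idx.toNat + d.length))

-- ===== PORT A =====
-- starts_comment: pos+3 < len and text[pos:pos+4] == '<!--'  (on the suffix of text at pos)
def startsComment (rest : List Char) : Bool := rest.take 4 = cOpen

-- read_comment's character loop (suffix representation; acc reversed like Python's list append)
def readCommentGo : List Char → List Char → List Char × List Char × List Char
  | [], acc => (acc.reverse, cOpen ++ acc.reverse, [])
  | c :: bs, acc =>
    if (c :: bs).take 3 = cClose then
      (acc.reverse, cOpen ++ acc.reverse ++ cClose, bs.drop 2)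
    else
      readCommentGo bs (c :: acc)

def readCommentA (rest : List Char) : List Char × List Char × List Char :=
  readCommentGo (rest.drop 4) []

-- termination helper for loopA
theorem readCommentGo_rest_le : ∀ (body acc : List Char), (readCommentGo body acc).2.2.length ≤ body.length := by
  intro body
  induction body with
  | nil => intro acc; simp [readCommentGo]
  | cons c bs ih =>
    intro acc
    simp only [readCommentGo]
    split
    · simp [List.length_drop]; omega
    · exact le_trans (ih (c :: acc)) (by simp)

-- A's while loop: index i becomes the suffix 'rest'; the three mode booleans and the output accumulator are A's state
def loopA (rest : List Char) (igB igL igN : Bool) (acc : List Char) : List Char :=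
  match rest with
  | [] => acc
  | c :: rs =>
    if igB then
      (if startsComment (c :: rs) then
        let r := readCommentA (c :: rs)
        loopA r.2.2 (if PySem.Chars.isIn dEnd r.1 then false else true) igL igN acc
      else
        loopA rs igB igL igN acc)
    else if igL then
      loopA rs igB (if c = '\n' then false else igL) igN acc
    else if igN then
      (if c = '\n' then
        loopA rs igB true false acc
      else
        loopA rs igB igL igN (acc ++ [c]))
    else if startsComment (c :: rs) then
      let r := readCommentA (c :: rs)
      let stripped := PySem.Chars.strip r.1
      if PySem.Chars.isIn dStart stripped && PySem.Chars.isIn dEnd stripped then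
        loopA r.2.2 igB igL igN acc
      else if PySem.Chars.isIn dStart stripped then
        loopA r.2.2 true igL igN acc
      else if PySem.Chars.isIn dNextLn stripped then
        loopA r.2.2 igB igL true acc
      else if PySem.Chars.isIn dIncl stripped then
        loopA r.2.2 igB igL igN (acc ++ removeDirective stripped dIncl)
      else
        loopA r.2.2 igB igL igN (acc ++ r.2.1)
    else
      loopA rs igB igL igN (acc ++ [c])
termination_by rest.length
decreasing_by
  all_goals simp only [readCommentA, List.length_cons]
  all_goals first
    | omega
    | (have h := readCommentGo_rest_le ((c :: rs).drop 4) []; simp [List.length_drop] at h ⊢; omega)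

def proccess_rawdesc (text : String) : String :=
  String.ofList (loopA text.toList false false false [])

-- ===== PORT B =====
inductive BMode where
  | default | block | line | nextline
deriving DecidableEq, Repr

-- termination helper for loopB
theorem find_sub_le {rest sub : List Char} (h : ¬ PySem.Chars.find rest sub = -1) :
    sub.length ≤ rest.length :=
  (List.IsInfix.length_le ((PySem.Chars.find_ne_neg_one_iff rest sub).mp h))

-- B's while loop: one mode tag, each step locates the next relevant token by find and consumes a chunk
def loopB (rest : List Char) (mode : BMode) (acc : List Char) : List Char :=
  match mode with
  | .line =>
    let j := PySem.Chars.find rest ['\n']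
    if hj : j = -1 then acc
    else loopB (rest.drop (j.toNat + 1)) .default acc
  | .nextline =>
    let j := PySem.Chars.find rest ['\n']
    if hj : j = -1 then acc ++ rest
    else loopB (rest.drop (j.toNat + 1)) .line (acc ++ rest.take j.toNat)
  | .block =>
    let j := PySem.Chars.find rest cOpen
    if hj : j = -1 then acc
    else
      let body := (rest.drop j.toNat).drop 4
      let k := PySem.Chars.find body cClose
      let ctext := if k = -1 then body else body.take k.toNat
      let rest' := if k = -1 then [] else body.drop (k.toNat + 3)
      loopB rest' (if PySem.Chars.isIn dEnd ctext then .default else .block) acc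
  | .default =>
    let j := PySem.Chars.find rest cOpen
    if hj : j = -1 then acc ++ rest
    else
      let acc₁ := acc ++ rest.take j.toNat
      let body := (rest.drop j.toNat).drop 4
      let k := PySem.Chars.find body cClose
      let ctext := if k = -1 then body else body.take k.toNat
      let cfull := if k = -1 then rest.drop j.toNat else (rest.drop j.toNat).take (k.toNat + 7)
      let rest' := if k = -1 then [] else body.drop (k.toNat + 3)
      let stripped := PySem.Chars.strip ctext
      if PySem.Chars.isIn dStart stripped && PySem.Chars.isIn dEnd stripped then
        loopB rest' .default acc₁
      else if PySem.Chars.isIn dStart stripped then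
        loopB rest' .block acc₁
      else if PySem.Chars.isIn dNextLn stripped then
        loopB rest' .nextline acc₁
      else if PySem.Chars.isIn dIncl stripped then
        loopB rest' .default (acc₁ ++ removeDirective stripped dIncl)
      else
        loopB rest' .default (acc₁ ++ cfull)
termination_by rest.length
decreasing_by
  all_goals (first
    | (have h1 := find_sub_le hj
       have h2 := PySem.Chars.find_le_length rest ['\n']
       have h3 := PySem.Chars.neg_one_le_find rest ['\n']
       simp [List.length_drop] at h1 ⊢; omega)
    | (have h1 : 4 ≤ rest.length := by simpa [cOpen] using find_sub_le hj
       split <;> simp [List.length_drop] <;> omega))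

def proccess_rawdesc_alt (text : String) : String :=
  String.ofList (loopB text.toList .default [])

-- ===== PRECONDITION & SPEC =====
def Spec_proccess_rawdesc (text : String) (out : String) : Prop := out = proccess_rawdesc_alt text
instance (text : String) (out : String) : Decidable (Spec_proccess_rawdesc text out) := by unfold Spec_proccess_rawdesc; infer_instance

-- ===== CLAIM (what is proved, stated in full; the proofs are below) =====
def Claim_equal_proccess_rawdesc : Prop := ∀ (text : String), Dom_proccess_rawdesc text → Spec_proccess_rawdesc text (proccess_rawdesc text)

-- ===== LEMMAS AND PROOFS =====

theorem find_eq_of {s sub : List Char} {j : Nat} (h1 : sub <+: s.drop j)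
    (h2 : ∀ i < j, ¬ sub <+: s.drop i) : PySem.Chars.find s sub = j := by
  have hinf : sub <:+: s := h1.isInfix.trans (List.drop_suffix j s).isInfix
  have hnn : 0 ≤ PySem.Chars.find s sub := (PySem.Chars.find_nonneg_iff s sub).mpr hinf
  obtain ⟨hpre, hmin⟩ := PySem.Chars.find_spec (s := s) (sub := sub) hnn
  rcases lt_trichotomy (PySem.Chars.find s sub).toNat j with h | h | h
  · exact absurd hpre (h2 _ h)
  · omega
  · exact absurd h1 (hmin j h)

theorem find_cons {c : Char} {rs sub : List Char} (h : ¬ sub <+: (c :: rs)) :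
    PySem.Chars.find (c :: rs) sub =
      (if PySem.Chars.find rs sub = -1 then -1 else PySem.Chars.find rs sub + 1) := by
  by_cases hf : PySem.Chars.find rs sub = -1
  · rw [if_pos hf]
    rw [PySem.Chars.find_eq_neg_one_iff] at hf ⊢
    intro hinf
    rcases List.infix_cons_iff.mp hinf with h' | h'
    · exact h h'
    · exact hf h'
  · rw [if_neg hf]
    have hnn : 0 ≤ PySem.Chars.find rs sub := by
      have := PySem.Chars.neg_one_le_find rs sub; omega
    obtain ⟨hpre, hmin⟩ := PySem.Chars.find_spec (s := rs) (sub := sub) hnn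
    have heq : PySem.Chars.find (c :: rs) sub = ((PySem.Chars.find rs sub).toNat + 1 : Nat) := by
      apply find_eq_of
      · simpa [List.drop_succ_cons] using hpre
      · intro i hi
        match i with
        | 0 => simpa using h
        | i + 1 => simpa [List.drop_succ_cons] using hmin i (by omega)
    rw [heq]; push_cast; omega
theorem take_eq_iff_prefix {s sub : List Char} (hlen : sub.length = 3) :
    s.take 3 = sub ↔ sub <+: s := by
  rw [List.prefix_iff_eq_take, hlen, eq_comm]

theorem readCommentGo_eq : ∀ (body acc : List Char),
    readCommentGo body acc =
      (let k := PySem.Chars.find body cClose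
       if k = -1 then (acc.reverse ++ body, cOpen ++ acc.reverse ++ body, [])
       else (acc.reverse ++ body.take k.toNat,
             cOpen ++ acc.reverse ++ body.take k.toNat ++ cClose,
             body.drop (k.toNat + 3))) := by
  intro body
  induction body with
  | nil =>
    intro acc
    have : PySem.Chars.find ([] : List Char) cClose = -1 := by decide
    simp [readCommentGo, this]
  | cons c bs ih =>
    intro acc
    by_cases h : (c :: bs).take 3 = cClose
    · have hpre : cClose <+: (c :: bs) := (take_eq_iff_prefix (by decide)).mp h
      have hf : PySem.Chars.find (c :: bs) cClose = 0 :=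
        find_eq_of (by simpa using hpre) (fun i hi => (Nat.not_lt_zero i hi).elim)
      simp [readCommentGo, h, hf, List.drop_succ_cons]
    · have hnpre : ¬ cClose <+: (c :: bs) := fun hp => h ((take_eq_iff_prefix (by decide)).mpr hp)
      have hf := find_cons hnpre
      rw [readCommentGo, if_neg h, ih (c :: acc)]
      by_cases hk : PySem.Chars.find bs cClose = -1
      · simp [hf, hk]
      · have hnn : 0 ≤ PySem.Chars.find bs cClose := by
          have := PySem.Chars.neg_one_le_find bs cClose; omega
        have ht : (PySem.Chars.find bs cClose + 1).toNat = (PySem.Chars.find bs cClose).toNat + 1 := by omega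
        have hne : ¬ (PySem.Chars.find bs cClose + 1 = -1) := by omega
        simp [hf, hk, ht, hne, List.take_succ_cons, List.drop_succ_cons]
theorem startsComment_iff {rest : List Char} : startsComment rest = true ↔ rest.take 4 = cOpen := by
  simp [startsComment]

theorem open_prefix_iff {rest : List Char} : cOpen <+: rest ↔ rest.take 4 = cOpen := by
  rw [List.prefix_iff_eq_take, show cOpen.length = 4 from rfl, eq_comm]

theorem find_open_zero {rest : List Char} (h : rest.take 4 = cOpen) :
    PySem.Chars.find rest cOpen = 0 :=
  find_eq_of (by rw [List.drop_zero]; exact open_prefix_iff.mpr h)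
    (fun i hi => (Nat.not_lt_zero i hi).elim)

theorem readCommentA_eq {rest : List Char} (h : rest.take 4 = cOpen) :
    readCommentA rest =
      (let body := rest.drop 4
       let k := PySem.Chars.find body cClose
       if k = -1 then (body, rest, ([] : List Char))
       else (body.take k.toNat, rest.take (k.toNat + 7), body.drop (k.toNat + 3))) := by
  unfold readCommentA
  rw [readCommentGo_eq]
  have hr : cOpen ++ rest.drop 4 = rest := by
    conv_rhs => rw [← List.take_append_drop 4 rest]
    rw [h]
  by_cases hk : PySem.Chars.find (rest.drop 4) cClose = -1
  · simp [hk, hr]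
  · have hnn : 0 ≤ PySem.Chars.find (rest.drop 4) cClose := by
      have := PySem.Chars.neg_one_le_find (rest.drop 4) cClose; omega
    obtain ⟨hpre, -⟩ := PySem.Chars.find_spec (s := rest.drop 4) (sub := cClose) hnn
    have htail : ((rest.drop 4).drop (PySem.Chars.find (rest.drop 4) cClose).toNat).take 3 = cClose :=
      (take_eq_iff_prefix (by decide)).mpr hpre
    have htake : rest.take ((PySem.Chars.find (rest.drop 4) cClose).toNat + 7) =
        cOpen ++ ((rest.drop 4).take (PySem.Chars.find (rest.drop 4) cClose).toNat ++ cClose) := by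
      have h47 : (PySem.Chars.find (rest.drop 4) cClose).toNat + 7 =
          4 + ((PySem.Chars.find (rest.drop 4) cClose).toNat + 3) := by omega
      rw [h47, List.take_add, h, List.take_add, htail]
    simp [hk, htake]
theorem nl_prefix_iff {c : Char} {rs : List Char} : ['\n'] <+: (c :: rs) ↔ c = '\n' := by
  constructor
  · intro h; exact ((List.cons_prefix_cons.mp h).1).symm
  · intro h; subst h; exact List.cons_prefix_cons.mpr ⟨rfl, List.nil_prefix⟩

theorem find_nl_zero {rs : List Char} : PySem.Chars.find ('\n' :: rs) ['\n'] = 0 :=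
  find_eq_of (by rw [List.drop_zero]; exact nl_prefix_iff.mpr rfl)
    (fun i hi => (Nat.not_lt_zero i hi).elim)

theorem loopB_line_nl {rs acc : List Char} : loopB ('\n' :: rs) .line acc = loopB rs .default acc := by
  conv_lhs => rw [loopB]
  simp [find_nl_zero]

theorem loopB_line_cons {c : Char} {rs acc : List Char} (h : ¬ c = '\n') :
    loopB (c :: rs) .line acc = loopB rs .line acc := by
  have hf := find_cons (c := c) (rs := rs) (sub := ['\n']) (fun hp => h (nl_prefix_iff.mp hp))
  by_cases hrs : PySem.Chars.find rs ['\n'] = -1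
  · conv_lhs => rw [loopB]
    conv_rhs => rw [loopB]
    simp [hf, hrs]
  · have hnn : 0 ≤ PySem.Chars.find rs ['\n'] := by
      have := PySem.Chars.neg_one_le_find rs ['\n']; omega
    have ht : (PySem.Chars.find rs ['\n'] + 1).toNat = (PySem.Chars.find rs ['\n']).toNat + 1 := by omega
    have hne : ¬ (PySem.Chars.find rs ['\n'] + 1 = -1) := by omega
    conv_lhs => rw [loopB]
    conv_rhs => rw [loopB]
    simp [hf, hrs, ht, hne, List.drop_succ_cons]

theorem loopB_nextline_nl {rs acc : List Char} : loopB ('\n' :: rs) .nextline acc = loopB rs .line acc := by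
  conv_lhs => rw [loopB]
  simp [find_nl_zero]

theorem loopB_nextline_cons {c : Char} {rs acc : List Char} (h : ¬ c = '\n') :
    loopB (c :: rs) .nextline acc = loopB rs .nextline (acc ++ [c]) := by
  have hf := find_cons (c := c) (rs := rs) (sub := ['\n']) (fun hp => h (nl_prefix_iff.mp hp))
  by_cases hrs : PySem.Chars.find rs ['\n'] = -1
  · conv_lhs => rw [loopB]
    conv_rhs => rw [loopB]
    simp [hf, hrs]
  · have hnn : 0 ≤ PySem.Chars.find rs ['\n'] := by
      have := PySem.Chars.neg_one_le_find rs ['\n']; omega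
    have ht : (PySem.Chars.find rs ['\n'] + 1).toNat = (PySem.Chars.find rs ['\n']).toNat + 1 := by omega
    have hne : ¬ (PySem.Chars.find rs ['\n'] + 1 = -1) := by omega
    conv_lhs => rw [loopB]
    conv_rhs => rw [loopB]
    simp [hf, hrs, ht, hne, List.drop_succ_cons, List.take_succ_cons]
theorem loopB_default_cons {c : Char} {rs acc : List Char} (hs : ¬ cOpen <+: (c :: rs)) :
    loopB (c :: rs) .default acc = loopB rs .default (acc ++ [c]) := by
  have hf := find_cons (c := c) (rs := rs) (sub := cOpen) hs
  by_cases hrs : PySem.Chars.find rs cOpen = -1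
  · conv_lhs => rw [loopB]
    conv_rhs => rw [loopB]
    simp [hf, hrs]
  · have hnn : 0 ≤ PySem.Chars.find rs cOpen := by
      have := PySem.Chars.neg_one_le_find rs cOpen; omega
    have ht : (PySem.Chars.find rs cOpen + 1).toNat = (PySem.Chars.find rs cOpen).toNat + 1 := by omega
    have hne : ¬ (PySem.Chars.find rs cOpen + 1 = -1) := by omega
    conv_lhs => rw [loopB]
    conv_rhs => rw [loopB]
    simp [hf, hrs, ht, hne, List.drop_succ_cons, List.take_succ_cons]

theorem loopB_block_cons {c : Char} {rs acc : List Char} (hs : ¬ cOpen <+: (c :: rs)) :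
    loopB (c :: rs) .block acc = loopB rs .block acc := by
  have hf := find_cons (c := c) (rs := rs) (sub := cOpen) hs
  by_cases hrs : PySem.Chars.find rs cOpen = -1
  · conv_lhs => rw [loopB]
    conv_rhs => rw [loopB]
    simp [hf, hrs]
  · have hnn : 0 ≤ PySem.Chars.find rs cOpen := by
      have := PySem.Chars.neg_one_le_find rs cOpen; omega
    have ht : (PySem.Chars.find rs cOpen + 1).toNat = (PySem.Chars.find rs cOpen).toNat + 1 := by omega
    have hne : ¬ (PySem.Chars.find rs cOpen + 1 = -1) := by omega
    conv_lhs => rw [loopB]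
    conv_rhs => rw [loopB]
    simp [hf, hrs, ht, hne, List.drop_succ_cons]

theorem loopB_default_comment {rest acc : List Char} (h : rest.take 4 = cOpen) :
    loopB rest .default acc =
      (let r := readCommentA rest
       let stripped := PySem.Chars.strip r.1
       if PySem.Chars.isIn dStart stripped && PySem.Chars.isIn dEnd stripped then
         loopB r.2.2 .default acc
       else if PySem.Chars.isIn dStart stripped then loopB r.2.2 .block acc
       else if PySem.Chars.isIn dNextLn stripped then loopB r.2.2 .nextline acc
       else if PySem.Chars.isIn dIncl stripped then loopB r.2.2 .default (acc ++ removeDirective stripped dIncl)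
       else loopB r.2.2 .default (acc ++ r.2.1)) := by
  conv_lhs => rw [loopB]
  rw [readCommentA_eq h]
  have hf := find_open_zero h
  by_cases hk : PySem.Chars.find (rest.drop 4) cClose = -1 <;>
    simp [hf, hk]

theorem loopB_block_comment {rest acc : List Char} (h : rest.take 4 = cOpen) :
    loopB rest .block acc =
      loopB (readCommentA rest).2.2
        (if PySem.Chars.isIn dEnd (readCommentA rest).1 then .default else .block) acc := by
  conv_lhs => rw [loopB]
  rw [readCommentA_eq h]
  have hf := find_open_zero h
  by_cases hk : PySem.Chars.find (rest.drop 4) cClose = -1 <;>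
    simp [hf, hk]
theorem readCommentA_len {c : Char} {rs : List Char} :
    (readCommentA (c :: rs)).2.2.length ≤ rs.length := by
  have h := readCommentGo_rest_le ((c :: rs).drop 4) []
  calc (readCommentA (c :: rs)).2.2.length ≤ ((c :: rs).drop 4).length := h
    _ ≤ rs.length := by simp [List.length_drop]

theorem main_equiv : ∀ (n : Nat) (rest : List Char), rest.length ≤ n → ∀ acc,
    (loopA rest false false false acc = loopB rest .default acc) ∧
    (loopA rest true false false acc = loopB rest .block acc) ∧
    (loopA rest false true false acc = loopB rest .line acc) ∧
    (loopA rest false false true acc = loopB rest .nextline acc) := by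
  intro n
  induction n with
  | zero =>
    intro rest hl acc
    have h0 : rest = [] := List.eq_nil_of_length_eq_zero (by omega)
    subst h0
    have hfo : PySem.Chars.find ([] : List Char) cOpen = -1 := by decide
    have hfn : PySem.Chars.find ([] : List Char) ['\n'] = -1 := by decide
    refine ⟨?_, ?_, ?_, ?_⟩ <;> (conv_rhs => rw [loopB]) <;> simp [loopA, hfo, hfn]
  | succ n ih =>
    intro rest hl acc
    match rest with
    | [] =>
      have hfo : PySem.Chars.find ([] : List Char) cOpen = -1 := by decide
      have hfn : PySem.Chars.find ([] : List Char) ['\n'] = -1 := by decide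
      refine ⟨?_, ?_, ?_, ?_⟩ <;> (conv_rhs => rw [loopB]) <;> simp [loopA, hfo, hfn]
    | c :: rs =>
      have hlen : rs.length ≤ n := by simp at hl; omega
      have hrlen : (readCommentA (c :: rs)).2.2.length ≤ n := le_trans readCommentA_len hlen
      refine ⟨?_, ?_, ?_, ?_⟩
      · -- default mode
        cases hsc : startsComment (c :: rs) with
        | false =>
          have hnp : ¬ cOpen <+: (c :: rs) := fun hp => by
            simp [startsComment, open_prefix_iff.mp hp] at hsc
          conv_lhs => rw [loopA]
          simp only [hsc, Bool.false_eq_true, if_false]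
          rw [(ih rs hlen (acc ++ [c])).1, loopB_default_cons hnp]
        | true =>
          conv_lhs => rw [loopA]
          simp only [hsc, Bool.false_eq_true, if_false, if_true]
          rw [loopB_default_comment (startsComment_iff.mp hsc)]
          dsimp only
          split_ifs
          · exact (ih _ hrlen acc).1
          · exact (ih _ hrlen acc).2.1
          · exact (ih _ hrlen acc).2.2.2
          · exact (ih _ hrlen _).1
          · exact (ih _ hrlen _).1
      · -- block mode
        cases hsc : startsComment (c :: rs) with
        | false =>
          have hnp : ¬ cOpen <+: (c :: rs) := fun hp => by
            have := open_prefix_iff.mp hp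
            simp [startsComment, this] at hsc
          conv_lhs => rw [loopA]
          simp only [hsc, Bool.false_eq_true, if_false, if_true]
          rw [(ih rs hlen acc).2.1, loopB_block_cons hnp]
        | true =>
          conv_lhs => rw [loopA]
          simp only [hsc, if_true]
          rw [loopB_block_comment (startsComment_iff.mp hsc)]
          by_cases he : PySem.Chars.isIn dEnd (readCommentA (c :: rs)).1 = true
          · simp only [he, if_true]
            exact (ih _ hrlen acc).1
          · simp only [he]
            exact (ih _ hrlen acc).2.1
      · -- line mode
        by_cases hc : c = '\n'
        · subst hc
          conv_lhs => rw [loopA]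
          simp only [if_true, Bool.false_eq_true, if_false]
          rw [(ih rs hlen acc).1, loopB_line_nl]
        · conv_lhs => rw [loopA]
          simp only [hc, if_false, Bool.false_eq_true, if_true]
          rw [(ih rs hlen acc).2.2.1, loopB_line_cons hc]
      · -- nextline mode
        by_cases hc : c = '\n'
        · subst hc
          conv_lhs => rw [loopA]
          simp only [if_true, Bool.false_eq_true, if_false]
          rw [(ih rs hlen acc).2.2.1, loopB_nextline_nl]
        · conv_lhs => rw [loopA]
          simp only [hc, if_false, Bool.false_eq_true, if_true]
          rw [(ih rs hlen (acc ++ [c])).2.2.2, loopB_nextline_cons hc]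

-- ===== VERDICT (by name: the statement is the Claim_ definition above) =====
theorem proccess_rawdesc_spec : Claim_equal_proccess_rawdesc := by
  intro text _
  unfold Spec_proccess_rawdesc proccess_rawdesc proccess_rawdesc_alt
  exact congrArg String.ofList ((main_equiv text.toList.length text.toList le_rfl []).1
    )
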